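-- pv_equiv track=rewrite | github.com/kiranj26/CAN-Log-Parser | test/can_parser.py | decode_signals
-- ===== SOURCE A (Python) =====
-- def decode_signals(can_messages, dbc_file):
--     # Assuming dbc decoding logic implemented here
--     signal_data = {
--         'UC_ControlMode': [],
--         'UC_CommandCounter': [],
--         'UC_ActiveDischarge': [],
--         'UC_UseRawSpeed': [],
--         'UCS_DirOfRotation': [],
--         'UC_Enable': []
--     }
--
--     for timestamp, message_id, data, message_name in can_messages:
--         for signal in data:
--             if signal in signal_data:
--                 signal_data[signal].append((timestamp, data[signal]))
--
--     return signal_data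
-- ===== SOURCE B (Python) =====
-- def decode_signals(can_messages, dbc_file):
--     names = ['UC_ControlMode', 'UC_CommandCounter', 'UC_ActiveDischarge',
--              'UC_UseRawSpeed', 'UCS_DirOfRotation', 'UC_Enable']
--     msgs = list(can_messages)
--     return {name: [(timestamp, data[name])
--                    for timestamp, _message_id, data, _message_name in msgs
--                    if name in data]
--             for name in names}
-- ===== Notes on version B (the rewrite author's own statement) =====
-- stated objective: idiomatic
-- what changed: Inverts the loop nesting: instead of one pass over messages with an inner membership-filtered append per signal, B materializes the messages and builds the result as a dict comprehension keyed by the six fixed signal names, each value a per-name comprehension over the messages.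
import Mathlib
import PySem

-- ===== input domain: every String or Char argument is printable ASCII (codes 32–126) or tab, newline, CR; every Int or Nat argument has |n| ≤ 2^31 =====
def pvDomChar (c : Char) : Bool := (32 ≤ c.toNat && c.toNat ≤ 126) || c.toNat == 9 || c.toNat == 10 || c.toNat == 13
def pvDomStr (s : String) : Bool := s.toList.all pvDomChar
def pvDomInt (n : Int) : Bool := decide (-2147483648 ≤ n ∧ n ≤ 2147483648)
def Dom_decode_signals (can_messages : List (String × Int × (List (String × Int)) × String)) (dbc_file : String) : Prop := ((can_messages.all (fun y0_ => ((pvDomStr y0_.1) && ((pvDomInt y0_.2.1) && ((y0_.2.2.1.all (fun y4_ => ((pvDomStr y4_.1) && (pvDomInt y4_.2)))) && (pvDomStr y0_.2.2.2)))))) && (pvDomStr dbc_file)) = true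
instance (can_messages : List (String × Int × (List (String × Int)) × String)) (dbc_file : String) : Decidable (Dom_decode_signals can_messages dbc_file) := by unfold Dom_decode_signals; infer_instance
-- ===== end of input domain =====

-- B inverts A's loop nesting: A makes one pass over the messages updating a six-key dict;
-- B builds the result per signal name with a comprehension over the messages (idiomatic; same cost).
-- ===== PORT A =====
def pvSignalNames : List String :=
  ["UC_ControlMode", "UC_CommandCounter", "UC_ActiveDischarge",
   "UC_UseRawSpeed", "UCS_DirOfRotation", "UC_Enable"]

def decode_signals (can_messages : List (String × Int × (List (String × Int)) × String)) (dbc_file : String) : List (String × List (String × Int)) :=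
  -- signal_data = { ... six names ... : [] }
  let signal_data : PySem.Dict String (List (String × Int)) :=
    PySem.Dict.ofList (pvSignalNames.map (fun n => (n, [])))
  -- for timestamp, message_id, data, message_name in can_messages:
  --     for signal in data: if signal in signal_data: signal_data[signal].append((timestamp, data[signal]))
  let final := can_messages.foldl (fun sd m =>
    let timestamp := m.1
    let data := PySem.Dict.ofList m.2.2.1
    data.items.foldl (fun sd p =>
      if sd.contains p.1 then sd.modify p.1 [] (· ++ [(timestamp, p.2)]) else sd) sd) signal_data
  final.items

-- ===== PORT B =====
def decode_signals_alt (can_messages : List (String × Int × (List (String × Int)) × String)) (dbc_file : String) : List (String × List (String × Int)) :=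
  let names : List String :=
    ["UC_ControlMode", "UC_CommandCounter", "UC_ActiveDischarge",
     "UC_UseRawSpeed", "UCS_DirOfRotation", "UC_Enable"]
  let msgs := can_messages
  names.map (fun name =>
    (name, msgs.filterMap (fun m =>
      ((PySem.Dict.ofList m.2.2.1).get? name).map (fun v => (m.1, v)))))

-- ===== PRECONDITION & SPEC =====
def Spec_decode_signals (can_messages : List (String × Int × (List (String × Int)) × String)) (dbc_file : String) (out : List (String × List (String × Int))) : Prop := out = decode_signals_alt can_messages dbc_file
instance (can_messages : List (String × Int × (List (String × Int)) × String)) (dbc_file : String) (out : List (String × List (String × Int))) : Decidable (Spec_decode_signals can_messages dbc_file out) := by unfold Spec_decode_signals; infer_instance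

-- ===== CLAIM (what is proved, stated in full; the proofs are below) =====
def Claim_equal_decode_signals : Prop := ∀ (can_messages : List (String × Int × (List (String × Int)) × String)) (dbc_file : String), Dom_decode_signals can_messages dbc_file → Spec_decode_signals can_messages dbc_file (decode_signals can_messages dbc_file)

-- ===== LEMMAS AND PROOFS =====


-- step of A's inner loop
def pvStep (ts : String) (sd : PySem.Dict String (List (String × Int))) (p : String × Int) :
    PySem.Dict String (List (String × Int)) :=
  if sd.contains p.1 then sd.modify p.1 [] (· ++ [(ts, p.2)]) else sd

lemma pvStep_contains (ts : String) (sd : PySem.Dict String (List (String × Int)))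
    (p : String × Int) (k : String) : (pvStep ts sd p).contains k = sd.contains k := by
  unfold pvStep; split_ifs with h
  · simp [pysem, h]
  · rfl

lemma pvStep_keys (ts : String) (sd : PySem.Dict String (List (String × Int)))
    (p : String × Int) : (pvStep ts sd p).keys = sd.keys := by
  unfold pvStep; split_ifs with h
  · simp [pysem, h]
  · rfl

lemma pvInner_keys (ts : String) (pairs : List (String × Int))
    (sd : PySem.Dict String (List (String × Int))) :
    (pairs.foldl (pvStep ts) sd).keys = sd.keys := by
  induction pairs generalizing sd with
  | nil => rfl
  | cons p rest ih => simp [List.foldl_cons, ih, pvStep_keys]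

lemma pvInner_contains (ts : String) (pairs : List (String × Int))
    (sd : PySem.Dict String (List (String × Int))) (k : String) :
    (pairs.foldl (pvStep ts) sd).contains k = sd.contains k := by
  induction pairs generalizing sd with
  | nil => rfl
  | cons p rest ih => simp [List.foldl_cons, ih, pvStep_contains]

lemma pvInner_getD (ts : String) (pairs : List (String × Int))
    (sd : PySem.Dict String (List (String × Int))) (n : String) :
    (pairs.foldl (pvStep ts) sd).getD n []
      = sd.getD n [] ++
        (if sd.contains n then (pairs.filter (fun p => p.1 == n)).map (fun p => (ts, p.2)) else []) := by
  induction pairs generalizing sd with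
  | nil => cases h : sd.contains n <;> simp
  | cons p rest ih =>
    simp only [List.foldl_cons, ih, pvStep_contains]
    unfold pvStep
    by_cases hc : sd.contains p.1 = true
    · rw [if_pos hc]
      by_cases hp : n = p.1
      · subst hp
        simp [pysem, hc]
      · simp [pysem, hp, Ne.symm hp]
    · rw [if_neg hc]
      by_cases hp : p.1 = n
      · have hn : sd.contains n = false := by
          rw [← hp]
          cases h2 : sd.contains p.1 with
          | false => rfl
          | true => exact absurd h2 hc
        simp [hn]
      · simp [hp]
-- on a nodup-keyed pair list, filtering by key n yields exactly the first-match lookup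
lemma pvFilter_lookup (l : List (String × Int)) (hn : (l.map Prod.fst).Nodup) (n : String) :
    l.filter (fun p => p.1 == n)
      = match (PySem.Dict.mk l).get? n with | some v => [(n, v)] | none => [] := by
  induction l with
  | nil => rfl
  | cons p rest ih =>
    simp only [List.map_cons, List.nodup_cons] at hn
    rw [List.filter_cons, PySem.Dict.get?_mk_cons]
    by_cases hp : p.1 = n
    · have : (rest.filter (fun q => q.1 == n)) = [] := by
        rw [List.filter_eq_nil_iff]
        intro q hq hbeq
        exact hn.1 (by
          have : q.1 = n := by simpa using hbeq
          rw [hp, ← this]; exact List.mem_map_of_mem hq)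
      simp only [hp, beq_self_eq_true, if_pos, this]
      rw [← hp]
    · simp [show (p.1 == n) = false from beq_false_of_ne hp, ih hn.2]

-- A's outer loop, per key: appends B's per-message contributions when the key is present
lemma pvOuter_getD (msgs : List (String × Int × (List (String × Int)) × String))
    (sd : PySem.Dict String (List (String × Int))) (n : String) (hn : sd.contains n = true) :
    (msgs.foldl (fun sd m =>
        let timestamp := m.1
        let data := PySem.Dict.ofList m.2.2.1
        data.items.foldl (fun sd p =>
          if sd.contains p.1 then sd.modify p.1 [] (· ++ [(timestamp, p.2)]) else sd) sd) sd).getD n []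
      = sd.getD n [] ++ msgs.filterMap (fun m =>
          ((PySem.Dict.ofList m.2.2.1).get? n).map (fun v => (m.1, v))) := by
  induction msgs generalizing sd with
  | nil => simp
  | cons m rest ih =>
    simp only [List.foldl_cons]
    have hstep : ∀ (ts : String) (d : PySem.Dict String (List (String × Int)))
        (pairs : List (String × Int)),
        pairs.foldl (fun sd p =>
          if sd.contains p.1 then sd.modify p.1 [] (· ++ [(ts, p.2)]) else sd) d
        = pairs.foldl (pvStep ts) d := by intro ts d pairs; rfl
    rw [hstep, ih _ (by rw [pvInner_contains]; exact hn)]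
    rw [pvInner_getD _ _ _ n, hn]
    have hnodup : ((PySem.Dict.ofList m.2.2.1).items.map Prod.fst).Nodup :=
      PySem.Dict.nodup_keys_ofList m.2.2.1
    have hmk : PySem.Dict.mk (PySem.Dict.ofList m.2.2.1).items = PySem.Dict.ofList m.2.2.1 := rfl
    rw [pvFilter_lookup _ hnodup n, hmk, List.filterMap_cons, List.append_assoc]
    cases (PySem.Dict.ofList m.2.2.1).get? n <;> simp

lemma pvMem_names (n : String) (h : n ∈ pvSignalNames) :
    (PySem.Dict.ofList (pvSignalNames.map (fun n => (n, ([] : List (String × Int)))))).contains n = true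
    ∧ (PySem.Dict.ofList (pvSignalNames.map (fun n => (n, ([] : List (String × Int)))))).getD n [] = [] := by
  fin_cases h <;> exact ⟨by decide, by decide⟩

-- ===== VERDICT (by name: the statement is the Claim_ definition above) =====
theorem decode_signals_spec : Claim_equal_decode_signals := by
  intro msgs dbc _
  unfold Spec_decode_signals decode_signals decode_signals_alt
  simp only []
  have hkeys : (msgs.foldl (fun sd m =>
      let timestamp := m.1
      let data := PySem.Dict.ofList m.2.2.1
      data.items.foldl (fun sd p =>
        if sd.contains p.1 then sd.modify p.1 [] (· ++ [(timestamp, p.2)]) else sd) sd)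
      (PySem.Dict.ofList (pvSignalNames.map (fun n => (n, []))))).keys
      = pvSignalNames := by
    have : ∀ (ms : List (String × Int × (List (String × Int)) × String))
        (sd : PySem.Dict String (List (String × Int))),
        (ms.foldl (fun sd m =>
          let timestamp := m.1
          let data := PySem.Dict.ofList m.2.2.1
          data.items.foldl (fun sd p =>
            if sd.contains p.1 then sd.modify p.1 [] (· ++ [(timestamp, p.2)]) else sd) sd) sd).keys
          = sd.keys := by
      intro ms
      induction ms with
      | nil => intro sd; rfl
      | cons m rest ih =>
        intro sd
        simp only [List.foldl_cons]
        rw [ih]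
        exact pvInner_keys m.1 _ sd
    rw [this]
    decide
  rw [PySem.Dict.items_eq_map_keys _ (by rw [hkeys]; decide) []]
  rw [hkeys]
  apply List.map_congr_left
  intro n hn
  obtain ⟨hc, hg⟩ := pvMem_names n hn
  rw [pvOuter_getD _ _ _ hc, hg]
  simp
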